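-- pv_equiv track=rewrite | github.com/EBNSchindi/paperless-ngx-integration | src/paperless_ngx/domain/value_objects/tag_similarity.py | _check_singular_plural
-- ===== SOURCE A (Python) =====
-- def _check_singular_plural(tag1: str, tag2: str) -> bool:
--     """Check if two tags are singular/plural variants.
--
--     Args:
--         tag1: First tag (normalized)
--         tag2: Second tag (normalized)
--
--     Returns:
--         True if tags are singular/plural variants
--     """
--     # Common German plural patterns
--     plural_patterns = [
--         ("", "e"),      # Brief -> Briefe
--         ("", "en"),     # Rechnung -> Rechnungen
--         ("", "n"),      # Lieferung -> Lieferungen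
--         ("", "er"),     # Kind -> Kinder
--         ("", "s"),      # Auto -> Autos
--         ("a", "ä"),     # Bank -> Bänke (with umlaut)
--         ("o", "ö"),     # Ton -> Töne
--         ("u", "ü"),     # Buch -> Bücher
--         ("ag", "äge"),  # Vertrag -> Verträge
--     ]
--
--     for singular_end, plural_end in plural_patterns:
--         # Check if tag2 is plural of tag1
--         if singular_end:
--             if tag1.endswith(singular_end) and tag2 == tag1[:-len(singular_end)] + plural_end:
--                 return True
--         else:
--             if tag2 == tag1 + plural_end:
--                 return True
--
--         # Check reverse (tag1 is plural of tag2)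
--         if singular_end:
--             if tag2.endswith(singular_end) and tag1 == tag2[:-len(singular_end)] + plural_end:
--                 return True
--         else:
--             if tag1 == tag2 + plural_end:
--                 return True
--
--     return False
-- ===== SOURCE B (Python) =====
-- # B: compute the longest common prefix once, then look the two leftover
-- # suffixes up in a set of allowed (singular_suffix, plural_suffix) pairs.
-- _SUFFIX_PAIRS = {
--     ("", "e"), ("", "en"), ("", "n"), ("", "er"), ("", "s"),
--     ("a", "\u00e4"), ("o", "\u00f6"), ("u", "\u00fc"), ("ag", "\u00e4ge"),
-- }
--
--
-- def _check_singular_plural(tag1: str, tag2: str) -> bool: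
--     i = 0
--     n = min(len(tag1), len(tag2))
--     while i < n and tag1[i] == tag2[i]:
--         i += 1
--     s1, s2 = tag1[i:], tag2[i:]
--     return (s1, s2) in _SUFFIX_PAIRS or (s2, s1) in _SUFFIX_PAIRS
-- ===== Notes on version B (the rewrite author's own statement) =====
-- stated objective: simpler
-- what changed: Replaces the 9-pattern forward/reverse endswith-and-slice loop by one longest-common-prefix scan followed by a single symmetric set lookup of the two leftover suffixes.
import Mathlib
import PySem

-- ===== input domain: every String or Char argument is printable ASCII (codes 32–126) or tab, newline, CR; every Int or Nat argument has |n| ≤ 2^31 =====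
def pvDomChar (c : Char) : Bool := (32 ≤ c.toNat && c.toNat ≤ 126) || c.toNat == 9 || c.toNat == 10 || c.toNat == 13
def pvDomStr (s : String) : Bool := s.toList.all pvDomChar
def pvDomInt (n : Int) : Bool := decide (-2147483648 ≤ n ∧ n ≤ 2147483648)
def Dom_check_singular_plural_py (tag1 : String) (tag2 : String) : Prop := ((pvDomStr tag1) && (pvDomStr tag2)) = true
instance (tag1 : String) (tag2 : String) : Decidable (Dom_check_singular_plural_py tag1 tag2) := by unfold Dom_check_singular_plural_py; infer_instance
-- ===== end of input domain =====

-- B replaces A's 9-pattern endswith-and-slice loop (both directions per pattern) by one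
-- longest-common-prefix scan plus a symmetric lookup of the two leftover suffixes; objective: simpler.

-- ===== PORT A =====
-- the plural_patterns list, as (singular_end, plural_end) over code points
def pvAPatterns : List (List Char × List Char) :=
  [([], ['e']), ([], ['e','n']), ([], ['n']), ([], ['e','r']), ([], ['s']),
   (['a'], ['ä']), (['o'], ['ö']), (['u'], ['ü']), (['a','g'], ['ä','g','e'])]

-- one pattern's test in one direction: tag1.endswith(se) and tag2 == tag1[:-len(se)] + pe
-- (else branch when se == "": tag2 == tag1 + pe)
def pvACond (t1 t2 : List Char) (se pe : List Char) : Bool :=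
  if se ≠ [] then
    PySem.Chars.endswith t1 se && t2 == PySem.List.slice t1 none (some (-(se.length : Int))) ++ pe
  else t2 == t1 ++ pe

-- the for loop with its early returns
def pvALoop (t1 t2 : List Char) : List (List Char × List Char) → Bool
  | [] => false
  | (se, pe) :: rest =>
    if pvACond t1 t2 se pe then true
    else if pvACond t2 t1 se pe then true
    else pvALoop t1 t2 rest

def check_singular_plural_py (tag1 : String) (tag2 : String) : Bool :=
  pvALoop tag1.toList tag2.toList pvAPatterns

-- ===== PORT B =====
-- the while loop computing the first mismatch index i
def pvLcpLen : List Char → List Char → Nat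
  | c :: x, d :: y => if c = d then pvLcpLen x y + 1 else 0
  | _, _ => 0

-- the suffix-pair set (membership tested both ways)
def pvBPairs : List (List Char × List Char) :=
  [([], ['e']), ([], ['e','n']), ([], ['n']), ([], ['e','r']), ([], ['s']),
   (['a'], ['ä']), (['o'], ['ö']), (['u'], ['ü']), (['a','g'], ['ä','g','e'])]

def check_singular_plural_py_alt (tag1 : String) (tag2 : String) : Bool :=
  let i := pvLcpLen tag1.toList tag2.toList
  let s1 := tag1.toList.drop i   -- tag1[i:] with 0 ≤ i
  let s2 := tag2.toList.drop i
  pvBPairs.contains (s1, s2) || pvBPairs.contains (s2, s1)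

-- ===== PRECONDITION & SPEC =====
def Spec_check_singular_plural_py (tag1 : String) (tag2 : String) (out : Bool) : Prop := out = check_singular_plural_py_alt tag1 tag2
instance (tag1 : String) (tag2 : String) (out : Bool) : Decidable (Spec_check_singular_plural_py tag1 tag2 out) := by unfold Spec_check_singular_plural_py; infer_instance

-- ===== CLAIM (what is proved, stated in full; the proofs are below) =====
def Claim_equal_check_singular_plural_py : Prop := ∀ (tag1 : String) (tag2 : String), Dom_check_singular_plural_py tag1 tag2 → Spec_check_singular_plural_py tag1 tag2 (check_singular_plural_py tag1 tag2)

-- ===== LEMMAS AND PROOFS =====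

-- a pattern pair whose two sides cannot begin with the same character
def pvGood (p q : List Char) : Prop :=
  match p, q with
  | [], [] => False
  | a :: _, b :: _ => a ≠ b
  | _, _ => True

lemma pvAPatterns_good : ∀ pr ∈ pvAPatterns, pvGood pr.1 pr.2 := by
  intro pr hmem
  fin_cases hmem <;> simp [pvGood]

lemma pvLcpLen_comm : ∀ x y : List Char, pvLcpLen x y = pvLcpLen y x := by
  intro x
  induction x with
  | nil => intro y; cases y <;> rfl
  | cons c x ih =>
    intro y; cases y with
    | nil => rfl
    | cons d y =>
      simp only [pvLcpLen]
      rcases eq_or_ne c d with h | h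
      · subst h; simp [ih]
      · simp [h, Ne.symm h]

lemma pvLcp_take : ∀ x y : List Char, x.take (pvLcpLen x y) = y.take (pvLcpLen x y) := by
  intro x
  induction x with
  | nil => intro y; cases y <;> rfl
  | cons c x ih =>
    intro y; cases y with
    | nil => rfl
    | cons d y =>
      simp only [pvLcpLen]
      rcases eq_or_ne c d with h | h
      · subst h; simp [ih]
      · simp [h]

lemma pvLcpLen_good {p q : List Char} (h : pvGood p q) : pvLcpLen p q = 0 := by
  cases p with
  | nil => cases q with
    | nil => exact absurd h (by simp [pvGood])
    | cons b qs => rfl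
  | cons a ps => cases q with
    | nil => rfl
    | cons b qs => simp [pvLcpLen, pvGood] at h ⊢; exact h

lemma pvLcpLen_append (r : List Char) {p q : List Char} (h : pvGood p q) :
    pvLcpLen (r ++ p) (r ++ q) = r.length := by
  induction r with
  | nil => simpa using pvLcpLen_good h
  | cons c r ih => simp [pvLcpLen, ih]

-- the key characterisation: for a good pair, "split at a common prefix" is "split at the LCP"
lemma pvDecomp_iff (x y : List Char) {p q : List Char} (h : pvGood p q) :
    (∃ r, x = r ++ p ∧ y = r ++ q) ↔
      (x.drop (pvLcpLen x y) = p ∧ y.drop (pvLcpLen x y) = q) := by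
  constructor
  · rintro ⟨r, rfl, rfl⟩
    rw [pvLcpLen_append r h]
    simp
  · rintro ⟨h1, h2⟩
    refine ⟨x.take (pvLcpLen x y), ?_, ?_⟩
    · rw [← h1]; simp
    · rw [← h2, pvLcp_take]; simp

-- pvACond holds exactly when the two tags split as common-stem ++ pattern sides
lemma pvACond_iff (t1 t2 se pe : List Char) :
    pvACond t1 t2 se pe = true ↔ ∃ r, t1 = r ++ se ∧ t2 = r ++ pe := by
  unfold pvACond
  rcases eq_or_ne se ([] : List Char) with hse | hse
  · subst hse; simp
  · rw [if_pos hse]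
    obtain ⟨c, se', rfl⟩ := List.exists_cons_of_ne_nil hse
    simp only [Bool.and_eq_true, beq_iff_eq, PySem.Chars.endswith_iff]
    constructor
    · rintro ⟨⟨r, rfl⟩, h2⟩
      refine ⟨r, rfl, ?_⟩
      rw [h2, PySem.List.slice_to_neg_natCast _ _ (by simp)]
      congr 1
      simp
    · rintro ⟨r, rfl, rfl⟩
      refine ⟨⟨r, rfl⟩, ?_⟩
      rw [PySem.List.slice_to_neg_natCast _ _ (by simp)]
      congr 2
      simp

-- the early-return loop is the disjunction of the per-pattern tests
lemma pvALoop_eq_any (t1 t2 : List Char) :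
    ∀ ps : List (List Char × List Char),
      pvALoop t1 t2 ps = ps.any (fun pr => pvACond t1 t2 pr.1 pr.2 || pvACond t2 t1 pr.1 pr.2) := by
  intro ps
  induction ps with
  | nil => rfl
  | cons pr rest ih =>
    obtain ⟨se, pe⟩ := pr
    simp only [pvALoop, List.any_cons, ← ih]
    by_cases h1 : pvACond t1 t2 se pe <;> by_cases h2 : pvACond t2 t1 se pe <;> simp [h1, h2]

lemma pvMain (x y : List Char) :
    pvALoop x y pvAPatterns =
      (pvBPairs.contains (x.drop (pvLcpLen x y), y.drop (pvLcpLen x y)) ||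
       pvBPairs.contains (y.drop (pvLcpLen x y), x.drop (pvLcpLen x y))) := by
  rw [pvALoop_eq_any]
  rcases hb : (pvBPairs.contains (x.drop (pvLcpLen x y), y.drop (pvLcpLen x y)) ||
      pvBPairs.contains (y.drop (pvLcpLen x y), x.drop (pvLcpLen x y))) with _ | _
  · -- both lookups fail: no pattern matches
    rw [Bool.or_eq_false_iff] at hb
    obtain ⟨hb1, hb2⟩ := hb
    rw [List.any_eq_false]
    rintro ⟨se, pe⟩ hmem
    have hg := pvAPatterns_good _ hmem
    simp only [Bool.or_eq_true, not_or, Bool.not_eq_true]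
    constructor
    · rcases hc : pvACond x y se pe with _ | _
      · rfl
      · exfalso
        obtain ⟨h1, h2⟩ := (pvDecomp_iff x y hg).mp ((pvACond_iff x y se pe).mp hc)
        have : ((x.drop (pvLcpLen x y), y.drop (pvLcpLen x y)) : List Char × List Char) ∈ pvBPairs := by
          rw [h1, h2]; exact hmem
        have h := List.contains_iff_mem.mpr this
        rw [hb1] at h
        exact Bool.false_ne_true h
    · rcases hc : pvACond y x se pe with _ | _
      · rfl
      · exfalso
        obtain ⟨h1, h2⟩ := (pvDecomp_iff y x hg).mp ((pvACond_iff y x se pe).mp hc)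
        rw [pvLcpLen_comm y x] at h1 h2
        have : ((y.drop (pvLcpLen x y), x.drop (pvLcpLen x y)) : List Char × List Char) ∈ pvBPairs := by
          rw [h1, h2]; exact hmem
        have h := List.contains_iff_mem.mpr this
        rw [hb2] at h
        exact Bool.false_ne_true h
  · -- some lookup succeeds: the corresponding pattern matches
    rw [Bool.or_eq_true] at hb
    rw [List.any_eq_true]
    rcases hb with hb | hb
    · rw [List.contains_iff_mem] at hb
      refine ⟨_, hb, ?_⟩
      rw [Bool.or_eq_true]
      left
      rw [pvACond_iff, pvDecomp_iff x y (pvAPatterns_good _ hb)]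
      exact ⟨rfl, rfl⟩
    · rw [List.contains_iff_mem] at hb
      refine ⟨_, hb, ?_⟩
      rw [Bool.or_eq_true]
      right
      rw [pvACond_iff, pvDecomp_iff y x (pvAPatterns_good _ hb)]
      rw [pvLcpLen_comm y x]
      exact ⟨rfl, rfl⟩

-- ===== VERDICT (by name: the statement is the Claim_ definition above) =====
theorem check_singular_plural_py_spec : Claim_equal_check_singular_plural_py := by
  intro tag1 tag2 _
  unfold Spec_check_singular_plural_py check_singular_plural_py check_singular_plural_py_alt
  exact pvMain tag1.toList tag2.toList
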